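-- pv_equiv track=rewrite | github.com/FZ920722/FT-DAG | MainHead.py | __subtract_elements
-- ===== SOURCE A (Python) =====
-- def __subtract_elements(arr1, arr2):
--     # 创建一个副本来存储 arr2 的元素数量
--     counts = {}
--     for elem in arr2:
--         counts[elem] = counts.get(elem, 0) + 1
--     result = []  # 用于存储结果的新数组
--     for elem in arr1:
--         if elem in counts and counts[elem] > 0:
--             counts[elem] -= 1  # 减少计数器，表示已经移除一次该元素
--         else:
--             if len(elem) == 1 and sum(elem) > 1:
--                 return None
--             result.append(elem)  # 如果不在 counts 中或计数为 0，则保留该元素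
--     return result
-- ===== SOURCE B (Python) =====
-- def __subtract_elements(arr1, arr2):
--     kept = [elem for i, elem in enumerate(arr1)
--             if arr1[: i + 1].count(elem) > arr2.count(elem)]
--     if any(len(elem) == 1 and sum(elem) > 1 for elem in kept):
--         return None
--     return kept
-- ===== Notes on version B (the rewrite author's own statement) =====
-- stated objective: simpler
-- what changed: Replaces A's decrementing count dictionary and stateful consume-or-keep loop by a stateless prefix-count rule (keep arr1[i] iff its count in arr1[:i+1] exceeds its count in arr2) written as one comprehension, with the guard checked in a separate pass over the kept list.
import Mathlib
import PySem

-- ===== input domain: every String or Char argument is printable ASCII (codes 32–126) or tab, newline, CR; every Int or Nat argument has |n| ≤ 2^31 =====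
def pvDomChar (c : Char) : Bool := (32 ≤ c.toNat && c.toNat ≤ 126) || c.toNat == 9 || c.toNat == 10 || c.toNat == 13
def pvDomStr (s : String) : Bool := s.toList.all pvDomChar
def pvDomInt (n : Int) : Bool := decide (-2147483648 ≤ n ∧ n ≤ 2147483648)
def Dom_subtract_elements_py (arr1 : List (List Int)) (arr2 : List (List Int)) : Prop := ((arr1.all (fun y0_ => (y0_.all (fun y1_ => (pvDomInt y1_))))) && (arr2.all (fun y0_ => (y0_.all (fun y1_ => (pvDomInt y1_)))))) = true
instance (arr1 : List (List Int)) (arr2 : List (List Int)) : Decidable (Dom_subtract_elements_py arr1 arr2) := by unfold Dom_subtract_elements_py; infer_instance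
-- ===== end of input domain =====

-- B replaces A's decrementing count dictionary and stateful consume-or-keep loop by a
-- stateless prefix-count rule (keep arr1[i] iff count in arr1[:i+1] exceeds count in arr2)
-- plus a separate guard pass over the kept list (objective: simpler).

-- ===== PORT A =====
-- the second loop of A, with 'return None' as early exit (counts carried as mutable state)
def pvGoA (counts : PySem.Dict (List Int) Int) : List (List Int) → Option (List (List Int))
  | [] => some []
  | e :: rest =>
    if counts.contains e ∧ counts.getD e 0 > 0 then
      pvGoA (counts.insert e (counts.getD e 0 - 1)) rest
    else if e.length = 1 ∧ e.sum > 1 then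
      none
    else
      (pvGoA counts rest).map (e :: ·)

def subtract_elements_py (arr1 : List (List Int)) (arr2 : List (List Int)) : Option (List (List Int)) :=
  let counts := arr2.foldl (fun d x => d.insert x (d.getD x 0 + 1)) PySem.Dict.empty
  pvGoA counts arr1

-- ===== PORT B =====
-- the comprehension: kept = [e for i, e in enumerate(arr1) if arr1[:i+1].count(e) > arr2.count(e)]
-- then: None if any kept element has len 1 and sum > 1, else kept
def subtract_elements_py_alt (arr1 : List (List Int)) (arr2 : List (List Int)) : Option (List (List Int)) :=
  let kept := ((PySem.List.enumerate arr1 0).filter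
      (fun p => decide ((PySem.List.slice arr1 none (some (p.1 + 1))).count p.2 > arr2.count p.2))).map (·.2)
  if kept.any (fun e => e.length == 1 && decide (e.sum > 1)) then none else some kept

-- ===== PRECONDITION & SPEC =====
def Spec_subtract_elements_py (arr1 : List (List Int)) (arr2 : List (List Int)) (out : Option (List (List Int))) : Prop := out = subtract_elements_py_alt arr1 arr2
instance (arr1 : List (List Int)) (arr2 : List (List Int)) (out : Option (List (List Int))) : Decidable (Spec_subtract_elements_py arr1 arr2 out) := by unfold Spec_subtract_elements_py; infer_instance

-- ===== CLAIM (what is proved, stated in full; the proofs are below) =====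
def Claim_equal_subtract_elements_py : Prop := ∀ (arr1 : List (List Int)) (arr2 : List (List Int)), Dom_subtract_elements_py arr1 arr2 → Spec_subtract_elements_py arr1 arr2 (subtract_elements_py arr1 arr2)

-- ===== LEMMAS AND PROOFS =====

-- recursive characterisation of B's kept list, prefix p accumulated
def pvKeep (arr2 : List (List Int)) (p : List (List Int)) : List (List Int) → List (List Int)
  | [] => []
  | e :: rest =>
    if (p ++ [e]).count e > arr2.count e then e :: pvKeep arr2 (p ++ [e]) rest
    else pvKeep arr2 (p ++ [e]) rest

theorem pvKept_eq_pvKeep (arr2 : List (List Int)) :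
    ∀ (xs p arr1 : List (List Int)), arr1 = p ++ xs →
    ((PySem.List.enumerate xs (p.length : Int)).filter
      (fun q => decide ((PySem.List.slice arr1 none (some (q.1 + 1))).count q.2 > arr2.count q.2))).map (·.2)
      = pvKeep arr2 p xs := by
  intro xs
  induction xs with
  | nil => intro p arr1 h; simp [PySem.List.enumerate, pvKeep]
  | cons e rest ih =>
    intro p arr1 h
    rw [PySem.List.enumerate_cons]
    have hslice : PySem.List.slice arr1 none (some ((p.length : Int) + 1))
        = p ++ [e] := by
      have : ((p.length : Int) + 1) = ((p.length + 1 : Nat) : Int) := by push_cast; ring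
      rw [this, PySem.List.slice_to_natCast, h]
      simp [List.take_append]
    have hrest : ((PySem.List.enumerate rest ((p.length : Int) + 1)).filter
        (fun q => decide ((PySem.List.slice arr1 none (some (q.1 + 1))).count q.2 > arr2.count q.2))).map (·.2)
        = pvKeep arr2 (p ++ [e]) rest := by
      have hlen : ((p.length : Int) + 1) = (((p ++ [e]).length : Nat) : Int) := by
        simp
      rw [hlen]
      exact ih (p ++ [e]) arr1 (by simpa using h)
    by_cases hc : (p ++ [e]).count e > arr2.count e
    · rw [pvKeep, if_pos hc]
      simp only [List.filter_cons, hslice]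
      rw [if_pos (by simpa using hc)]
      simpa using hrest
    · rw [pvKeep, if_neg hc]
      simp only [List.filter_cons, hslice]
      rw [if_neg (by simpa using hc)]
      exact hrest

-- core invariant: A's decremented counter vs B's prefix-count rule
theorem pvGoA_eq_keep (arr2 : List (List Int)) :
    ∀ (xs : List (List Int)) (counts : PySem.Dict (List Int) Int) (p : List (List Int)),
    (∀ x, counts.contains x = decide (x ∈ arr2)) →
    (∀ x, counts.getD x 0 = (arr2.count x : Int) - min ((p.count x : Int)) ((arr2.count x : Int))) →
    pvGoA counts xs =
      (if (pvKeep arr2 p xs).any (fun e => e.length == 1 && decide (e.sum > 1)) then none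
       else some (pvKeep arr2 p xs)) := by
  intro xs
  induction xs with
  | nil => intro counts p _ _; simp [pvGoA, pvKeep]
  | cons e rest ih =>
    intro counts p hcont hcnt
    have hce := hcnt e
    have hcountE : (p ++ [e]).count e = p.count e + 1 := by simp
    by_cases hlt : p.count e < arr2.count e
    · -- consumed: counter positive, prefix-count rule drops e
      have hpos : counts.getD e 0 > 0 := by rw [hce]; omega
      have hmem : e ∈ arr2 := List.count_pos_iff.mp (by omega)
      have hcontains : counts.contains e = true := by rw [hcont e]; simpa using hmem
      have hnotkeep : ¬ ((p ++ [e]).count e > arr2.count e) := by rw [hcountE]; omega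
      rw [pvGoA, if_pos ⟨hcontains, hpos⟩, pvKeep, if_neg hnotkeep]
      apply ih
      · intro x
        rw [PySem.Dict.contains_insert, hcont x]
        by_cases hx : x = e
        · subst hx; simp [hmem]
        · simp [hx]
      · intro x
        rw [PySem.Dict.getD_insert]
        by_cases hx : x = e
        · subst hx
          rw [if_pos rfl, hce, hcountE]
          push_cast
          omega
        · rw [if_neg hx, hcnt x]
          have : (p ++ [e]).count x = p.count x := by simp [List.count_append, Ne.symm hx]
          rw [this]
    · -- kept: counter exhausted, prefix-count rule keeps e
      have hzero : counts.getD e 0 = 0 := by rw [hce]; omega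
      have hnpos : ¬ (counts.contains e = true ∧ counts.getD e 0 > 0) := by
        rintro ⟨-, h⟩; omega
      have hkeep : (p ++ [e]).count e > arr2.count e := by rw [hcountE]; omega
      have hcnt' : ∀ x, counts.getD x 0
          = (arr2.count x : Int) - min (((p ++ [e]).count x : Int)) ((arr2.count x : Int)) := by
        intro x
        by_cases hx : x = e
        · subst hx; rw [hce, hcountE]; push_cast; omega
        · rw [hcnt x]
          have : (p ++ [e]).count x = p.count x := by simp [List.count_append, Ne.symm hx]
          rw [this]
      rw [pvGoA, if_neg hnpos, pvKeep, if_pos hkeep]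
      by_cases hbad : e.length = 1 ∧ e.sum > 1
      · rw [if_pos hbad]
        have : (e.length == 1 && decide (e.sum > 1)) = true := by
          simp [hbad.1, hbad.2]
        rw [if_pos (by simp [List.any_cons, this])]
      · rw [if_neg hbad]
        rw [ih counts (p ++ [e]) hcont hcnt']
        have hbadb : (e.length == 1 && decide (e.sum > 1)) = false := by
          rcases Decidable.em (e.length = 1) with h1 | h1
          · have h2 : ¬ e.sum > 1 := fun h2 => hbad ⟨h1, h2⟩
            simp [h1, h2]
          · simp [h1]
        by_cases hany : (pvKeep arr2 (p ++ [e]) rest).any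
            (fun e => e.length == 1 && decide (e.sum > 1)) = true
        · simp [List.any_cons, hbadb, hany]
        · simp [List.any_cons, hbadb, hany]

-- ===== VERDICT (by name: the statement is the Claim_ definition above) =====
theorem subtract_elements_py_spec : Claim_equal_subtract_elements_py := by
  intro arr1 arr2 _
  show subtract_elements_py arr1 arr2 = subtract_elements_py_alt arr1 arr2
  have hB : subtract_elements_py_alt arr1 arr2 =
      (if (pvKeep arr2 [] arr1).any (fun e => e.length == 1 && decide (e.sum > 1)) then none
       else some (pvKeep arr2 [] arr1)) := by
    have h := pvKept_eq_pvKeep arr2 arr1 [] arr1 (by simp)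
    simp only [List.length_nil, Nat.cast_zero] at h
    unfold subtract_elements_py_alt
    rw [h]
  rw [hB]
  unfold subtract_elements_py
  apply pvGoA_eq_keep
  · intro x
    rw [PySem.Dict.foldl_insert_getD_add_one_eq_counter, PySem.Dict.contains_counter]
    simp
  · intro x
    rw [PySem.Dict.foldl_insert_getD_add_one_eq_counter, PySem.Dict.getD_counter]
    simp
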